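-- pv_equiv track=rewrite | github.com/Klemma/AIML_labs | Lab1/Task 7/task7.py | get_chars_combinations
-- ===== SOURCE A (Python) =====
-- def get_chars_combinations(text: str, comb_len: int) -> dict:
--     combinations = {}
--     comb = ""
--     for ch in text:
--         if ch != ' ':
--             comb += ch
--         else:
--             comb = ""
--             continue
--         if len(comb) == comb_len:
--             combinations[comb] = 1 if comb not in combinations else combinations[comb] + 1
--             comb = comb[1:]
--     return combinations
-- ===== SOURCE B (Python) =====
-- def get_chars_combinations(text: str, comb_len: int) -> dict:
--     if comb_len <= 0:
--         return {}
--     counts = {}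
--     for word in text.split(' '):
--         for i in range(len(word) - comb_len + 1):
--             sub = word[i:i + comb_len]
--             counts[sub] = counts.get(sub, 0) + 1
--     return counts
-- ===== Notes on version B (the rewrite author's own statement) =====
-- stated objective: simpler
-- what changed: Replaces A's per-character rolling buffer (with manual reset on spaces and drop-first-char bookkeeping) by splitting the text into words once and counting each word's fixed-length slices by direct index slicing.
import Mathlib
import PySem

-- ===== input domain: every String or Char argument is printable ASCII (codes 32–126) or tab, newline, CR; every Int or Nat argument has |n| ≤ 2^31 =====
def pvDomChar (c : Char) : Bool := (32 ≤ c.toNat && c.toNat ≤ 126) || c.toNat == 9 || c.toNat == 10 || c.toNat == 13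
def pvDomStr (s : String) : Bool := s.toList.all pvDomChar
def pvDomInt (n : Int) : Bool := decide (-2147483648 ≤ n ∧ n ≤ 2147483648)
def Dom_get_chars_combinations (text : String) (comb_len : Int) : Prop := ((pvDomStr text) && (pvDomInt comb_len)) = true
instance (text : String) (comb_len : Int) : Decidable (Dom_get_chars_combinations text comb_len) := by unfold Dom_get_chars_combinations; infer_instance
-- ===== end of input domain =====

-- B replaces A's per-character rolling buffer by splitting the text into words once and
-- counting each word's fixed-length slices by direct index slicing (simpler decomposition).

-- ===== PORT A =====
-- one iteration of A's `for ch in text` loop; state = (combinations, comb)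
def pvStepA (comb_len : Int) (st : PySem.Dict String Int × List Char) (ch : Char) :
    PySem.Dict String Int × List Char :=
  if ch ≠ ' ' then
    let comb := st.2 ++ [ch]
    if (comb.length : Int) = comb_len then
      (st.1.insert (String.ofList comb)
        (if st.1.contains (String.ofList comb) then st.1.getD (String.ofList comb) 0 + 1 else 1),
       PySem.List.slice comb (some 1) none)      -- comb = comb[1:]
    else (st.1, comb)
  else (st.1, [])                                -- comb = ""; continue

def get_chars_combinations (text : String) (comb_len : Int) : List (String × Int) :=
  (text.toList.foldl (pvStepA comb_len) ((PySem.Dict.empty : PySem.Dict String Int), [])).1.items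

-- ===== PORT B =====
def get_chars_combinations_alt (text : String) (comb_len : Int) : List (String × Int) :=
  if comb_len ≤ 0 then [] else
  ((PySem.Chars.splitOn text.toList [' ']).foldl (fun d w =>
      (PySem.List.pyRange 0 ((w.length : Int) - comb_len + 1) 1).foldl (fun d i =>
        let sub := String.ofList (PySem.List.slice w (some i) (some (i + comb_len)))
        d.insert sub (d.getD sub 0 + 1)) d)
    (PySem.Dict.empty : PySem.Dict String Int)).items

-- ===== PRECONDITION & SPEC =====
def Spec_get_chars_combinations (text : String) (comb_len : Int) (out : List (String × Int)) : Prop := out = get_chars_combinations_alt text comb_len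
instance (text : String) (comb_len : Int) (out : List (String × Int)) : Decidable (Spec_get_chars_combinations text comb_len out) := by unfold Spec_get_chars_combinations; infer_instance

-- ===== CLAIM (what is proved, stated in full; the proofs are below) =====
def Claim_equal_get_chars_combinations : Prop := ∀ (text : String) (comb_len : Int), Dom_get_chars_combinations text comb_len → Spec_get_chars_combinations text comb_len (get_chars_combinations text comb_len)

-- ===== LEMMAS AND PROOFS =====

-- increment the count of word w in d
def pvIncr (d : PySem.Dict String Int) (w : List Char) : PySem.Dict String Int :=
  d.insert (String.ofList w) (d.getD (String.ofList w) 0 + 1)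

-- all length-k windows of u, left to right
def pvWindows (k : Nat) (u : List Char) : List (List Char) :=
  (List.range (u.length + 1 - k)).map (fun i => (u.drop i).take k)

def pvProcW (k : Nat) (d : PySem.Dict String Int) (u : List Char) : PySem.Dict String Int :=
  (pvWindows k u).foldl pvIncr d

-- the words of cs, split at every single space (Python str.split(' '))
def pvWords : List Char → List (List Char)
  | [] => [[]]
  | c :: cs => if c = ' ' then [] :: pvWords cs else (pvWords cs).modifyHead (c :: ·)

theorem pvWords_ne_nil (cs : List Char) : pvWords cs ≠ [] := by
  induction cs with
  | nil => simp [pvWords]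
  | cons c cs ih =>
    simp only [pvWords]
    split
    · simp
    · cases h : pvWords cs with
      | nil => exact absurd h ih
      | cons w ws => simp

-- PySem's splitOn on a single space is pvWords
theorem pv_go_eq (fuel : Nat) : ∀ (l cur : List Char) (acc : List (List Char)),
    l.length ≤ fuel →
    PySem.Chars.splitOn.go [' '] fuel l cur acc
      = acc.reverse ++ (pvWords l).modifyHead (cur.reverse ++ ·) := by
  induction fuel with
  | zero =>
    intro l cur acc hl
    have : l = [] := List.length_eq_zero_iff.mp (Nat.le_zero.mp hl)
    subst this
    simp [PySem.Chars.splitOn.go, pvWords]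
  | succ fuel ih =>
    intro l cur acc hl
    cases l with
    | nil => simp [PySem.Chars.splitOn.go, pvWords]
    | cons c rest =>
      by_cases hc : c = ' '
      · subst hc
        have h1 : PySem.Chars.splitOn.go [' '] (fuel+1) (' ' :: rest) cur acc
            = PySem.Chars.splitOn.go [' '] fuel rest [] (cur.reverse :: acc) := by
          simp [PySem.Chars.splitOn.go]
        rw [h1, ih rest [] (cur.reverse :: acc) (by simpa using Nat.succ_le_succ_iff.mp hl)]
        cases hW : pvWords rest with
        | nil => exact absurd hW (pvWords_ne_nil rest)
        | cons w ws => simp [pvWords, hW]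
      · have h1 : PySem.Chars.splitOn.go [' '] (fuel+1) (c :: rest) cur acc
            = PySem.Chars.splitOn.go [' '] fuel rest (c :: cur) acc := by
          simp [PySem.Chars.splitOn.go, List.isPrefixOf]
          intro h; exact absurd h.symm hc
        rw [h1, ih rest (c :: cur) acc (by simpa using Nat.succ_le_succ_iff.mp hl)]
        have h2 : pvWords (c :: rest) = (pvWords rest).modifyHead (c :: ·) := by
          simp [pvWords, hc]
        rw [h2]
        cases hW : pvWords rest with
        | nil => exact absurd hW (pvWords_ne_nil rest)
        | cons w ws => simp

theorem pv_splitOn_eq (cs : List Char) :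
    PySem.Chars.splitOn cs [' '] = pvWords cs := by
  show PySem.Chars.splitOn.go [' '] (cs.length + 1) cs [] [] = pvWords cs
  rw [pv_go_eq (cs.length + 1) cs [] [] (by omega)]
  cases hW : pvWords cs with
  | nil => exact absurd hW (pvWords_ne_nil cs)
  | cons w ws => simp


-- pvWords text splits exactly like PySem's splitOn (proved above); now the counting side.

theorem pvIncr_eq (d : PySem.Dict String Int) (w : List Char) :
    d.insert (String.ofList w)
      (if d.contains (String.ofList w) then d.getD (String.ofList w) 0 + 1 else 1)
      = pvIncr d w := by
  by_cases h : d.contains (String.ofList w) = true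
  · simp [pvIncr, h]
  · simp only [Bool.not_eq_true] at h
    simp [pvIncr, h, PySem.Dict.getD_of_not_contains _ _ h]

theorem pvProcW_short (k : Nat) (d : PySem.Dict String Int) (u : List Char)
    (h : u.length + 1 ≤ k) : pvProcW k d u = d := by
  unfold pvProcW pvWindows
  have : u.length + 1 - k = 0 := by omega
  simp [this]

theorem pvWindows_cons (k : Nat) (hk : 1 ≤ k) (u : List Char) (hu : k ≤ u.length) :
    pvWindows k u = u.take k :: pvWindows k (u.drop 1) := by
  unfold pvWindows
  have h1 : u.length + 1 - k = ((u.drop 1).length + 1 - k) + 1 := by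
    simp; omega
  rw [h1, List.range_succ_eq_map, List.map_cons, List.map_map]
  simp only [List.drop_zero]
  congr 1
  apply List.map_congr_left
  intro i _
  simp [Function.comp]

theorem pvProcW_step (k : Nat) (hk : 1 ≤ k) (d : PySem.Dict String Int)
    (p w : List Char) (hp : p.length = k) :
    pvProcW k d (p ++ w) = pvProcW k (pvIncr d p) (p.drop 1 ++ w) := by
  have hlen : k ≤ (p ++ w).length := by simp [hp]
  unfold pvProcW
  rw [pvWindows_cons k hk _ hlen, List.foldl_cons, List.take_left' hp,
      List.drop_append_of_le_length (by omega)]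

theorem pvStepA_space (comb_len : Int) (st : PySem.Dict String Int × List Char) :
    pvStepA comb_len st ' ' = (st.1, []) := by
  simp [pvStepA]

theorem pvStepA_hit (comb_len : Int) (st : PySem.Dict String Int × List Char) (c : Char)
    (hc : c ≠ ' ') (h : ((st.2 ++ [c]).length : Int) = comb_len) :
    pvStepA comb_len st c = (pvIncr st.1 (st.2 ++ [c]), (st.2 ++ [c]).drop 1) := by
  unfold pvStepA
  rw [if_pos hc]
  simp only []
  rw [if_pos h, pvIncr_eq, PySem.List.slice_from_one, List.drop_one]

theorem pvStepA_miss (comb_len : Int) (st : PySem.Dict String Int × List Char) (c : Char)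
    (hc : c ≠ ' ') (h : ¬ ((st.2 ++ [c]).length : Int) = comb_len) :
    pvStepA comb_len st c = (st.1, st.2 ++ [c]) := by
  unfold pvStepA
  rw [if_pos hc]
  simp only []
  rw [if_neg h]

theorem pvA_main (k : Nat) : ∀ (cs comb : List Char) (d : PySem.Dict String Int),
    comb.length + 1 ≤ k →
    (List.foldl (pvStepA (k : Int)) (d, comb) cs).1
      = (pvWords cs).tail.foldl (pvProcW k) (pvProcW k d (comb ++ (pvWords cs).headI)) := by
  intro cs
  induction cs with
  | nil =>
    intro comb d h
    simp [pvWords, pvProcW_short k d comb h]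
  | cons c cs ih =>
    intro comb d h
    by_cases hc : c = ' '
    · subst hc
      rw [List.foldl_cons, pvStepA_space, ih [] d (by simp; omega)]
      simp only [pvWords, if_pos]
      cases hW : pvWords cs with
      | nil => exact absurd hW (pvWords_ne_nil cs)
      | cons w ws =>
        simp [pvProcW_short k d comb h]
    · by_cases hlen : comb.length + 1 = k
      · have hcond : (((comb ++ [c]).length : Int) = (k : Int)) := by
          simp only [List.length_append, List.length_singleton]; push_cast; omega
        rw [List.foldl_cons, pvStepA_hit (k : Int) (d, comb) c hc hcond,
            ih ((comb ++ [c]).drop 1) (pvIncr d (comb ++ [c])) (by simp; omega)]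
        simp only [pvWords, if_neg hc]
        cases hW : pvWords cs with
        | nil => exact absurd hW (pvWords_ne_nil cs)
        | cons w ws =>
          simp only [List.modifyHead, List.tail_cons, List.headI_cons]
          have : comb ++ c :: w = (comb ++ [c]) ++ w := by simp
          rw [this, pvProcW_step k (by omega) d (comb ++ [c]) w (by simp; omega)]
      · have hcond : ¬ (((comb ++ [c]).length : Int) = (k : Int)) := by
          simp only [List.length_append, List.length_singleton]; push_cast; omega
        rw [List.foldl_cons, pvStepA_miss (k : Int) (d, comb) c hc hcond,
            ih (comb ++ [c]) d (by simp; omega)]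
        simp only [pvWords, if_neg hc]
        cases hW : pvWords cs with
        | nil => exact absurd hW (pvWords_ne_nil cs)
        | cons w ws =>
          simp only [List.modifyHead, List.tail_cons, List.headI_cons]
          congr 2
          simp

theorem pvA_nonpos (comb_len : Int) (h : comb_len ≤ 0) :
    ∀ (cs comb : List Char) (d : PySem.Dict String Int),
    (List.foldl (pvStepA comb_len) (d, comb) cs).1 = d := by
  intro cs
  induction cs with
  | nil => intro comb d; rfl
  | cons c cs ih =>
    intro comb d
    have hcond : ¬ (((comb ++ [c]).length : Int) = comb_len) := by
      simp only [List.length_append, List.length_singleton]; push_cast; omega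
    by_cases hc : c = ' '
    · subst hc
      rw [List.foldl_cons, pvStepA_space, ih]
    · rw [List.foldl_cons, pvStepA_miss comb_len (d, comb) c hc hcond, ih]


theorem pvB_inner (k : Nat) (w : List Char) (d : PySem.Dict String Int) :
    (PySem.List.pyRange 0 ((w.length : Int) - (k : Int) + 1) 1).foldl (fun d i =>
      let sub := String.ofList (PySem.List.slice w (some i) (some (i + (k : Int))))
      d.insert sub (d.getD sub 0 + 1)) d = pvProcW k d w := by
  rw [PySem.List.pyRange_one, List.foldl_map]
  have hn : (((w.length : Int) - (k : Int) + 1) - 0).toNat = w.length + 1 - k := by omega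
  rw [hn]
  unfold pvProcW pvWindows
  rw [List.foldl_map]
  apply PySem.List.foldl_congr_mem
  intro acc j _
  simp only [zero_add]
  rw [PySem.List.slice_natCast_add]
  simp [pvIncr]

-- ===== VERDICT (by name: the statement is the Claim_ definition above) =====
theorem get_chars_combinations_spec : Claim_equal_get_chars_combinations := by
  unfold Claim_equal_get_chars_combinations Spec_get_chars_combinations
  intro text comb_len _
  unfold get_chars_combinations get_chars_combinations_alt
  by_cases hk : comb_len ≤ 0
  · rw [if_pos hk, pvA_nonpos comb_len hk]
    rfl
  · rw [if_neg hk]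
    obtain ⟨k, hkc⟩ : ∃ k : Nat, (k : Int) = comb_len :=
      ⟨comb_len.toNat, Int.toNat_of_nonneg (by omega)⟩
    have hk1 : 1 ≤ k := by omega
    subst hkc
    rw [pv_splitOn_eq, pvA_main k text.toList [] _ (by simp; omega)]
    have hfun : (fun (d : PySem.Dict String Int) (w : List Char) =>
        (PySem.List.pyRange 0 ((w.length : Int) - (k : Int) + 1) 1).foldl (fun d i =>
          let sub := String.ofList (PySem.List.slice w (some i) (some (i + (k : Int))))
          d.insert sub (d.getD sub 0 + 1)) d) = pvProcW k := by
      funext d w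
      exact pvB_inner k w d
    rw [hfun]
    cases hW : pvWords text.toList with
    | nil => exact absurd hW (pvWords_ne_nil _)
    | cons w ws =>
      simp only [List.tail_cons, List.headI_cons, List.nil_append, List.foldl_cons]
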